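-- pv_equiv track=rewrite | github.com/TheConstant3/ETL | main.py | get_dict_of_same_rows
-- ===== SOURCE A (Python) =====
-- def get_dict_of_same_rows(n, data):
--     # словарь повторяющихся строк: строка D1...Dn(ключ) - её индексы в списке(значение)
--     same_rows_with_indexes = {}
--
--     for index, row in enumerate(data):
--         # набор D1...Dn текущей строки - ключ словаря
--         set_of_d_columns = str(row[:n])
--         # получение индекса строки с данным ключом(набором D1...Dn)
--         index_uniq_row = same_rows_with_indexes.get(set_of_d_columns)
--         # если такого ключа не существует, то создаём его
--         # и присваиваем ему индекс текущей строки списка all_data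
--         if index_uniq_row is None:
--             same_rows_with_indexes[set_of_d_columns] = []
--             same_rows_with_indexes[set_of_d_columns].append(index)
--         # если строка с таким набором существует
--         # то добавляем в словарь текущий индекс
--         else:
--             same_rows_with_indexes[set_of_d_columns].append(index)
--
--     return same_rows_with_indexes
-- ===== SOURCE B (Python) =====
-- def get_dict_of_same_rows(n, data):
--     # Two-pass decomposition: tag each index with its key, dedup keys in
--     # first-occurrence order, then gather each key's indices by filtering.
--     pairs = [(str(row[:n]), index) for index, row in enumerate(data)]
--     keys = list(dict.fromkeys(key for key, _ in pairs))
--     return {key: [i for q, i in pairs if q == key] for key in keys}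
-- ===== Notes on version B (the rewrite author's own statement) =====
-- stated objective: alternative
-- what changed: Replaces A's single-pass dict building (get/insert/append per row) with a two-pass decomposition: tag every index with its key, dedup keys in first-occurrence order, then gather each key's indices with a filter per key.
import Mathlib
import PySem

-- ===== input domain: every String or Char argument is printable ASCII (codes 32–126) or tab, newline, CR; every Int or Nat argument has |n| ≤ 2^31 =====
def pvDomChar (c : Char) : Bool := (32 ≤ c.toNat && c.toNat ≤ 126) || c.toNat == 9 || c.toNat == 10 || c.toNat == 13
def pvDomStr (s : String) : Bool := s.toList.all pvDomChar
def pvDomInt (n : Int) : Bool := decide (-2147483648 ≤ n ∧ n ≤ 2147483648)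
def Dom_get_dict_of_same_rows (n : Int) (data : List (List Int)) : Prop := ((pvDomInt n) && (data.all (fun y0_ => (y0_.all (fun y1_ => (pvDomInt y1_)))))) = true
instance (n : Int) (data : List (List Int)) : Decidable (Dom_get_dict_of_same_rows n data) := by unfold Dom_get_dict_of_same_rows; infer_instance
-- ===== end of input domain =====

-- B replaces A's incremental dict-building loop by a two-pass decomposition
-- (key/index pairs, ordered dedup of keys, then a gathering filter per key);
-- objective: alternative (same result, genuinely different structure).


-- ===== PORT A =====
-- str(xs) for a Python list of ints: "[a, b, c]" — exact on List Int
def pyStrIntList (xs : List Int) : String :=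
  "[" ++ String.intercalate ", " (xs.map PySem.Int.toStr) ++ "]"

def get_dict_of_same_rows (n : Int) (data : List (List Int)) : List (String × List Int) :=
  ((PySem.List.enumerate data 0).foldl
    (fun (d : PySem.Dict String (List Int)) (p : Int × List Int) =>
      let set_of_d_columns := pyStrIntList (PySem.List.slice p.2 none (some n))
      match d.get? set_of_d_columns with
      | none => (d.insert set_of_d_columns []).modify set_of_d_columns [] (fun l => l ++ [p.1])
      | some _ => d.modify set_of_d_columns [] (fun l => l ++ [p.1]))
    PySem.Dict.empty).items

-- ===== PORT B =====
def get_dict_of_same_rows_alt (n : Int) (data : List (List Int)) : List (String × List Int) :=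
  let pairs := (PySem.List.enumerate data 0).map
    (fun p => (pyStrIntList (PySem.List.slice p.2 none (some n)), p.1))
  let keys := PySem.List.dedup (pairs.map (·.1))
  keys.map (fun k => (k, (pairs.filter (fun q => q.1 == k)).map (·.2)))

-- ===== PRECONDITION & SPEC =====
def Spec_get_dict_of_same_rows (n : Int) (data : List (List Int)) (out : List (String × List Int)) : Prop := out = get_dict_of_same_rows_alt n data
instance (n : Int) (data : List (List Int)) (out : List (String × List Int)) : Decidable (Spec_get_dict_of_same_rows n data out) := by unfold Spec_get_dict_of_same_rows; infer_instance

-- ===== CLAIM (what is proved, stated in full; the proofs are below) =====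
def Claim_equal_get_dict_of_same_rows : Prop := ∀ (n : Int) (data : List (List Int)), Dom_get_dict_of_same_rows n data → Spec_get_dict_of_same_rows n data (get_dict_of_same_rows n data)

-- ===== LEMMAS AND PROOFS =====

-- A's branch on get? collapses: both arms are d.modify k [] (· ++ [i])
theorem dict_step_collapse (d : PySem.Dict String (List Int)) (k : String) (i : Int) :
    (match d.get? k with
     | none => (d.insert k []).modify k [] (fun l => l ++ [i])
     | some _ => d.modify k [] (fun l => l ++ [i])) = d.modify k [] (fun l => l ++ [i]) := by
  cases h : d.get? k with
  | none =>
      simp [PySem.Dict.modify, PySem.Dict.insert_insert_self,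
            PySem.Dict.getD_of_get?_eq_none d [] h]
  | some v => rfl

theorem get_dict_of_same_rows_spec' (n : Int) (data : List (List Int)) :
    get_dict_of_same_rows n data = get_dict_of_same_rows_alt n data := by
  unfold get_dict_of_same_rows get_dict_of_same_rows_alt
  set pairs : List (String × Int) := (PySem.List.enumerate data 0).map
    (fun p => (pyStrIntList (PySem.List.slice p.2 none (some n)), p.1)) with hpairs
  have hfold :
      (PySem.List.enumerate data 0).foldl
        (fun (d : PySem.Dict String (List Int)) (p : Int × List Int) =>
          let set_of_d_columns := pyStrIntList (PySem.List.slice p.2 none (some n))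
          match d.get? set_of_d_columns with
          | none => (d.insert set_of_d_columns []).modify set_of_d_columns [] (fun l => l ++ [p.1])
          | some _ => d.modify set_of_d_columns [] (fun l => l ++ [p.1]))
        PySem.Dict.empty
      = pairs.foldl (fun d q => d.modify q.1 [] (fun l => l ++ [q.2])) PySem.Dict.empty := by
    rw [hpairs, List.foldl_map]
    exact List.foldl_ext _ _ _ (fun d p _ => dict_step_collapse d _ p.1)
  rw [hfold]
  set D := pairs.foldl (fun d q => d.modify q.1 [] (fun l => l ++ [q.2])) PySem.Dict.empty with hD
  have hnodup : D.keys.Nodup := by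
    rw [hD]
    exact PySem.Dict.nodup_keys_foldl_modify_key pairs (·.1) [] (fun d q => (fun l => l ++ [q.2]))
      PySem.Dict.empty (by simp)
  have hkeys : D.keys = PySem.List.dedup (pairs.map (·.1)) := by
    rw [hD]
    rw [PySem.Dict.keys_foldl_modify_key]
    simp [PySem.Set.update_nil_left]
  rw [PySem.Dict.items_eq_map_keys D hnodup [], hkeys]
  refine List.map_congr_left (fun k _ => ?_)
  have := PySem.Dict.getD_foldl_modify_append (l := pairs) (d := PySem.Dict.empty) (c := k)
  simp only [hD]
  rw [this]
  simp

-- ===== VERDICT (by name: the statement is the Claim_ definition above) =====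
theorem get_dict_of_same_rows_spec : Claim_equal_get_dict_of_same_rows := by
  intro n data _
  unfold Spec_get_dict_of_same_rows
  exact get_dict_of_same_rows_spec' n data
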